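-- pv_equiv track=rewrite | github.com/guyi66/insight-research-room | finance_tools/aitrados_client.py | _iter_quarters
-- ===== SOURCE A (Python) =====
-- def _iter_quarters(start_year: int, start_quarter: int, max_periods: int):
--     """
--     从给定的起始年/季度往前枚举若干个季度。
--     例如 start_year=2025, start_quarter=4, max_periods=6
--     => (2025,4),(2025,3),(2025,2),(2025,1),(2024,4),(2024,3)
--     """
--     year, quarter = start_year, start_quarter
--     for _ in range(max_periods):
--         # Baostock 财务数据大致从 2007 年开始，再往前意义也不大
--         if year < 2007:
--             break
--         yield year, quarter
--         quarter -= 1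
--         if quarter == 0:
--             year -= 1
--             quarter = 4
-- ===== SOURCE B (Python) =====
-- def _iter_quarters(start_year: int, start_quarter: int, max_periods: int):
--     """Enumerate up to max_periods quarters backwards from (start_year, start_quarter).
--
--     Walks the years backwards: the start year contributes quarters
--     start_quarter..1, every earlier year contributes 4..1, and years before
--     2007 contribute nothing (financial data only exists from 2007 on)."""
--     if max_periods <= 0:
--         return
--     remaining = max_periods
--     hi = start_quarter
--     for year in range(start_year, 2006, -1):
--         for quarter in range(hi, 0, -1):
--             if remaining == 0:
--                 return
--             yield year, quarter
--             remaining -= 1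
--         hi = 4
-- ===== Notes on version B (the rewrite author's own statement) =====
-- stated objective: alternative
-- what changed: Replaces A's single per-period loop that mutates (year, quarter) with a carry by a per-year decomposition: an outer walk over the years back to 2007 whose inner loop emits that year's quarters, counting down a remaining-periods budget.
-- intended difference: On starts with start_year >= 2007, max_periods >= 1 and a non-positive quarter label, A's decrement never reaches 0 so it emits ever-decreasing invalid labels of the same year forever, e.g. (2020,0),(2020,-1), while B starts with the previous year's real quarters, e.g. (2019,4),(2019,3), which is the intended value for a quarter enumerator. — e.g. on _iter_quarters(2020, 0, 2): A returns [(2020, 0), (2020, -1)], B returns [(2019, 4), (2019, 3)]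
import Mathlib
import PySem

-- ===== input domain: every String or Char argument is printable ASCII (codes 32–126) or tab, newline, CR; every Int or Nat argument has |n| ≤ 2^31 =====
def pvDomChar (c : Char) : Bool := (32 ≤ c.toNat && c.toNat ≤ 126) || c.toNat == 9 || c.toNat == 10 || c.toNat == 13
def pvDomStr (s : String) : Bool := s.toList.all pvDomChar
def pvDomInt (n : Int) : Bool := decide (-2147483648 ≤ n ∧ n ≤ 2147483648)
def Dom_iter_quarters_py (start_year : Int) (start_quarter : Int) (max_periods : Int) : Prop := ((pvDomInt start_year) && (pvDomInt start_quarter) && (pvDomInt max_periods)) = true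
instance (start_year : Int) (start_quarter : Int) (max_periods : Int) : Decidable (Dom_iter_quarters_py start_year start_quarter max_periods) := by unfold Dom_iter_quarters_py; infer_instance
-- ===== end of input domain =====

-- B walks the years back to 2007, emitting each year's quarters against a remaining-periods
-- budget, instead of A's single per-period loop mutating (year, quarter) with a carry; same cost.

-- ===== PORT A =====
-- A's 'for _ in range(max_periods)' loop; state (year, quarter), yields accumulated in acc
def iterQA_loop : Nat → Int → Int → List (Int × Int) → List (Int × Int)
  | 0, _, _, acc => acc.reverse
  | n + 1, year, quarter, acc =>
    if year < 2007 then acc.reverse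
    else
      let acc' := (year, quarter) :: acc
      let quarter' := quarter - 1
      if quarter' == 0 then iterQA_loop n (year - 1) 4 acc'
      else iterQA_loop n year quarter' acc'

def iter_quarters_py (start_year : Int) (start_quarter : Int) (max_periods : Int) : List (Int × Int) :=
  iterQA_loop max_periods.toNat start_year start_quarter []

-- ===== PORT B =====
-- Source B's inner 'for quarter in range(hi, 0, -1)' loop with its early 'return':
-- returns (yielded items, remaining afterwards, whether the generator returned)
def iterQB_inner : Nat → Int → Int → Int → (List (Int × Int) × Int × Bool)
  | 0, _, _, rem => ([], rem, false)
  | n + 1, year, quarter, rem =>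
    if rem == 0 then ([], rem, true)
    else
      let p := iterQB_inner n year (quarter - 1) (rem - 1)
      ((year, quarter) :: p.1, p.2)

-- Source B's outer 'for year in range(start_year, 2006, -1)' loop; hi is 4 after the first year
def iterQB_outer : Nat → Int → Int → Int → List (Int × Int)
  | 0, _, _, _ => []
  | n + 1, year, hi, rem =>
    let p := iterQB_inner hi.toNat year hi rem
    if p.2.2 then p.1
    else p.1 ++ iterQB_outer n (year - 1) 4 p.2.1

def iter_quarters_py_alt (start_year : Int) (start_quarter : Int) (max_periods : Int) : List (Int × Int) :=
  if max_periods ≤ 0 then []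
  else iterQB_outer (start_year - 2006).toNat start_year start_quarter max_periods

-- ===== PRECONDITION & SPEC =====
-- On starts with start_year ≥ 2007, max_periods ≥ 1 and a non-positive quarter label, A's
-- naive decrement never reaches 0, so it emits ever-decreasing invalid labels of the same
-- year forever, e.g. (2020,0),(2020,-1); B instead starts with the previous year's real
-- quarters, e.g. (2019,4),(2019,3), which is the intended value for a quarter enumerator.
def D_iter_quarters_py (start_year : Int) (start_quarter : Int) (max_periods : Int) : Prop :=
  1 ≤ max_periods ∧ 2007 ≤ start_year ∧ start_quarter ≤ 0
instance (start_year : Int) (start_quarter : Int) (max_periods : Int) : Decidable (D_iter_quarters_py start_year start_quarter max_periods) := by unfold D_iter_quarters_py; infer_instance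

def Spec_iter_quarters_py (start_year : Int) (start_quarter : Int) (max_periods : Int) (out : List (Int × Int)) : Prop := ¬ D_iter_quarters_py start_year start_quarter max_periods → out = iter_quarters_py_alt start_year start_quarter max_periods
instance (start_year : Int) (start_quarter : Int) (max_periods : Int) (out : List (Int × Int)) : Decidable (Spec_iter_quarters_py start_year start_quarter max_periods out) := by unfold Spec_iter_quarters_py; infer_instance

def pvDiffWitness_iter_quarters_py : Int × Int × Int := (2020, 0, 2)
def pvDiffWitnessOut_iter_quarters_py : (List (Int × Int)) × (List (Int × Int)) :=
  ([(2020, 0), (2020, -1)], [(2019, 4), (2019, 3)])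

-- ===== CLAIM (what is proved, stated in full; the proofs are below) =====
def Claim_unchanged_iter_quarters_py : Prop := ∀ (start_year : Int) (start_quarter : Int) (max_periods : Int), Dom_iter_quarters_py start_year start_quarter max_periods → Spec_iter_quarters_py start_year start_quarter max_periods (iter_quarters_py start_year start_quarter max_periods)
def Claim_changed_iter_quarters_py : Prop := Dom_iter_quarters_py (pvDiffWitness_iter_quarters_py.1) (pvDiffWitness_iter_quarters_py.2.1) (pvDiffWitness_iter_quarters_py.2.2) ∧ D_iter_quarters_py (pvDiffWitness_iter_quarters_py.1) (pvDiffWitness_iter_quarters_py.2.1) (pvDiffWitness_iter_quarters_py.2.2) ∧ iter_quarters_py (pvDiffWitness_iter_quarters_py.1) (pvDiffWitness_iter_quarters_py.2.1) (pvDiffWitness_iter_quarters_py.2.2) = pvDiffWitnessOut_iter_quarters_py.1 ∧ iter_quarters_py_alt (pvDiffWitness_iter_quarters_py.1) (pvDiffWitness_iter_quarters_py.2.1) (pvDiffWitness_iter_quarters_py.2.2) = pvDiffWitnessOut_iter_quarters_py.2 ∧ pvDiffWitnessOut_iter_quarters_py.1 ≠ pvDiffWitnessOut_iter_quarters_py.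2
def Claim_exact_iter_quarters_py : Prop := ∀ (start_year : Int) (start_quarter : Int) (max_periods : Int), Dom_iter_quarters_py start_year start_quarter max_periods → D_iter_quarters_py start_year start_quarter max_periods → iter_quarters_py start_year start_quarter max_periods ≠ iter_quarters_py_alt start_year start_quarter max_periods

-- ===== LEMMAS AND PROOFS =====

-- A's loop with the accumulator stripped
def iterQA_out : Nat → Int → Int → List (Int × Int)
  | 0, _, _ => []
  | n + 1, year, quarter =>
    if year < 2007 then []
    else
      (year, quarter) ::
        (if quarter - 1 == 0 then iterQA_out n (year - 1) 4
         else iterQA_out n year (quarter - 1))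

theorem iterQA_loop_eq (n : Nat) : ∀ (y q : Int) (acc : List (Int × Int)),
    iterQA_loop n y q acc = acc.reverse ++ iterQA_out n y q := by
  induction n with
  | zero => intro y q acc; simp [iterQA_loop, iterQA_out]
  | succ n ih =>
    intro y q acc
    by_cases hy : y < 2007
    · simp [iterQA_loop, iterQA_out, hy]
    · by_cases hq : q - 1 == 0 <;> simp [iterQA_loop, iterQA_out, hy, hq, ih]

theorem iterQA_out_lt (n : Nat) (y q : Int) (hy : y < 2007) : iterQA_out n y q = [] := by
  cases n <;> simp [iterQA_out, hy]

-- inner-loop invariant: B's inner loop yields exactly A's next min(rem, q) periods of year y,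
-- and stops the generator iff rem < q
theorem inner_spec (h : Nat) : ∀ (y q rem : Int), 2007 ≤ y → 1 ≤ q → q.toNat = h → 0 ≤ rem →
    (rem < q → iterQB_inner h y q rem = (iterQA_out rem.toNat y q, 0, true)) ∧
    (q ≤ rem → (iterQB_inner h y q rem).2 = (rem - q, false) ∧
      iterQA_out rem.toNat y q
        = (iterQB_inner h y q rem).1 ++ iterQA_out (rem - q).toNat (y - 1) 4) := by
  induction h with
  | zero => intro y q rem _ h1 hq _; omega
  | succ h ih =>
    intro y q rem hy h1 hq hr
    by_cases hr0 : rem = 0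
    · subst hr0
      refine ⟨fun _ => ?_, fun hqr => absurd hqr (by omega)⟩
      simp [iterQB_inner, iterQA_out]
    · have hrem : ¬ (rem == 0) := by simp; omega
      by_cases hq1 : q = 1
      · subst hq1
        have h0 : h = 0 := by omega
        subst h0
        have ht : rem.toNat = (rem.toNat - 1) + 1 := by omega
        refine ⟨fun hlt => by omega, fun _ => ?_⟩
        simp only [iterQB_inner, hrem]
        rw [ht]
        simp only [iterQA_out, if_neg (by omega : ¬ y < 2007)]
        have : (rem - 1).toNat = rem.toNat - 1 := by omega
        simp [this]
      · have hq2 : 2 ≤ q := by omega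
        obtain ⟨ih1, ih2⟩ := ih y (q - 1) (rem - 1) hy (by omega) (by omega) (by omega)
        have ht : rem.toNat = (rem.toNat - 1) + 1 := by omega
        have ht' : (rem - 1).toNat = rem.toNat - 1 := by omega
        constructor
        · intro hlt
          have := ih1 (by omega)
          simp only [iterQB_inner, hrem, this]
          rw [ht]
          simp only [iterQA_out, if_neg (by omega : ¬ y < 2007),
            if_neg (by simp; omega : ¬ (q - 1 == 0))]
          simp [ht']
        · intro hqr
          obtain ⟨ihA, ihB⟩ := ih2 (by omega)
          constructor
          · have hif : (iterQB_inner (h + 1) y q rem).2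
                = (iterQB_inner h y (q - 1) (rem - 1)).2 := by
              simp [iterQB_inner, hrem]
            rw [hif, ihA]
            have e : rem - 1 - (q - 1) = rem - q := by ring
            rw [e]
          · rw [ht]
            simp only [iterQA_out, if_neg (by omega : ¬ y < 2007),
              if_neg (by simp; omega : ¬ (q - 1 == 0))]
            rw [← ht', ihB]
            have e : rem - 1 - (q - 1) = rem - q := by ring
            simp [iterQB_inner, hrem, e]

-- outer-loop invariant: B's per-year walk reproduces A's period walk
theorem outer_spec (n : Nat) : ∀ (y q rem : Int), 1 ≤ q → 0 ≤ rem → (y - 2006).toNat = n →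
    iterQA_out rem.toNat y q = iterQB_outer n y q rem := by
  induction n with
  | zero =>
    intro y q rem _ _ hn
    rw [iterQA_out_lt _ _ _ (by omega)]
    rfl
  | succ n ih =>
    intro y q rem h1 hr hn
    have hy : 2007 ≤ y := by omega
    obtain ⟨s1, s2⟩ := inner_spec q.toNat y q rem hy h1 rfl hr
    by_cases hqr : rem < q
    · have hs := s1 hqr
      simp [iterQB_outer, hs]
    · obtain ⟨ihA, ihB⟩ := s2 (by omega)
      rw [ihB, ih (y - 1) 4 (rem - q) (by norm_num) (by omega) (by omega)]
      simp [iterQB_outer, ihA]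

-- every quarter label B emits is positive
theorem inner_snd_pos (h : Nat) : ∀ (y q rem : Int) (p : Int × Int),
    p ∈ (iterQB_inner h y q rem).1 → q - h < p.2 := by
  induction h with
  | zero => intro y q rem p hp; simp [iterQB_inner] at hp
  | succ h ih =>
    intro y q rem p hp
    by_cases hr : rem == 0
    · simp [iterQB_inner, hr] at hp
    · simp [iterQB_inner, hr, List.mem_cons] at hp
      rcases hp with hp | hp
      · subst hp; push_cast; simp
      · have := ih y (q - 1) (rem - 1) p hp
        push_cast at this ⊢
        omega

theorem outer_snd_pos (n : Nat) : ∀ (y hi rem : Int) (p : Int × Int),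
    p ∈ iterQB_outer n y hi rem → 1 ≤ p.2 := by
  induction n with
  | zero => intro y hi rem p hp; simp [iterQB_outer] at hp
  | succ n ih =>
    intro y hi rem p hp
    simp only [iterQB_outer] at hp
    have hin : ∀ r, p ∈ (iterQB_inner hi.toNat y hi r).1 → 1 ≤ p.2 := by
      intro r hr
      rcases le_or_gt 0 hi with hhi | hhi
      · have := inner_snd_pos hi.toNat y hi r p hr
        omega
      · have h0 : hi.toNat = 0 := by omega
        rw [h0] at hr
        simp [iterQB_inner] at hr
    by_cases hs : (iterQB_inner hi.toNat y hi rem).2.2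
    · rw [if_pos hs] at hp
      exact hin _ hp
    · rw [if_neg hs, List.mem_append] at hp
      rcases hp with hp | hp
      · exact hin _ hp
      · exact ih _ _ _ p hp

theorem iter_quarters_py_spec : Claim_unchanged_iter_quarters_py := by
  intro y q m _ hnD
  unfold D_iter_quarters_py at hnD
  unfold iter_quarters_py iter_quarters_py_alt
  rw [iterQA_loop_eq]
  simp only [List.reverse_nil, List.nil_append]
  by_cases hm : m ≤ 0
  · have h0 : m.toNat = 0 := by omega
    rw [h0, if_pos hm]
    rfl
  · rw [if_neg hm]
    by_cases hq : 1 ≤ q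
    · exact outer_spec (y - 2006).toNat y q m hq (by omega) rfl
    · have hy : y < 2007 := by
        by_contra hy; exact hnD ⟨by omega, by omega, by omega⟩
      rw [iterQA_out_lt _ _ _ hy]
      have h0 : (y - 2006).toNat = 0 := by omega
      rw [h0]
      rfl

theorem iter_quarters_py_changed : Claim_changed_iter_quarters_py := by
  unfold Claim_changed_iter_quarters_py; decide

theorem iter_quarters_py_tight : Claim_exact_iter_quarters_py := by
  intro y q m _ hD heq
  obtain ⟨hm, hy, hq⟩ := hD
  obtain ⟨k, hk⟩ : ∃ k, m.toNat = k + 1 := ⟨m.toNat - 1, by omega⟩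
  have hmem : (y, q) ∈ iter_quarters_py y q m := by
    unfold iter_quarters_py
    rw [iterQA_loop_eq]
    simp only [List.reverse_nil, List.nil_append, hk]
    simp [iterQA_out, if_neg (by omega : ¬ y < 2007)]
  rw [heq] at hmem
  unfold iter_quarters_py_alt at hmem
  rw [if_neg (by omega : ¬ m ≤ 0)] at hmem
  have := outer_snd_pos _ _ _ _ _ hmem
  simp at this
  omega
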